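-- pv_equiv track=rewrite | github.com/notforyou23/COSMO_BrainStudio | brains/bigautocombo.brain/outputs/execution/src/customer_discovery/rendering.py | md_escape_inline
-- ===== SOURCE A (Python) =====
-- from typing import Any, Iterable, Mapping, Sequence
--
-- def as_text(value: Any) -> str:
--     if value is None:
--         return ""
--     if isinstance(value, str):
--         return value
--     return str(value)
--
-- def md_escape_inline(text: str) -> str:
--     """Escape common Markdown metacharacters for inline contexts."""
--     text = as_text(text)
--     rep = {
--         "\\": "\\\\",
--         "`": "\\`",
--         "*": "\\*",
--         "_": "\\_",
--         "[": "\\[",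
--         "]": "\\]",
--         "<": "\\<",
--         ">": "\\>",
--     }
--     for k, v in rep.items():
--         text = text.replace(k, v)
--     return text
-- ===== SOURCE B (Python) =====
-- def as_text(value) -> str:
--     if value is None:
--         return ""
--     if isinstance(value, str):
--         return value
--     return str(value)
--
-- def md_escape_inline(text: str) -> str:
--     """Escape common Markdown metacharacters for inline contexts (single pass)."""
--     text = as_text(text)
--     rep = {
--         "\\": "\\\\",
--         "`": "\\`",
--         "*": "\\*",
--         "_": "\\_",
--         "[": "\\[",
--         "]": "\\]",
--         "<": "\\<",
--         ">": "\\>",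
--     }
--     return "".join(rep.get(c, c) for c in text)
-- ===== Notes on version B (the rewrite author's own statement) =====
-- stated objective: alternative
-- what changed: Replaces eight sequential full-string str.replace passes by a single pass over the characters that emits each character's escape via one dict lookup; same O(n) cost, different traversal.
import Mathlib
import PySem

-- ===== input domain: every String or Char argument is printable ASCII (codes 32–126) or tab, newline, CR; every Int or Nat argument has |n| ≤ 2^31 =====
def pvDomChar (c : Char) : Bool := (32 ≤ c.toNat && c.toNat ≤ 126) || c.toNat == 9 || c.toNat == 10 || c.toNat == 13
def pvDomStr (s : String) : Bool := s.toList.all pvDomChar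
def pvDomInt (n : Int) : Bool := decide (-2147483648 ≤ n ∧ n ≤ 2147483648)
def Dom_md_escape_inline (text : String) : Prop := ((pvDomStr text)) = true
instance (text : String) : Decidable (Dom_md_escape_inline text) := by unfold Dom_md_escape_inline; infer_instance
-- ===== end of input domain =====

-- B replaces A's eight sequential full-string replace passes by a single pass over the
-- characters, emitting each character's escape via one dict lookup (objective: alternative
-- single-scan traversal; same asymptotic cost, not claimed faster).


-- ===== PORT A =====
-- as_text: the parameter is typed str, so as_text is the identity here.
-- rep is a dict literal with distinct keys: as an association list in insertion order.
def md_escape_inline (text : String) : String :=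
  let rep : List (String × String) :=
    [("\\", "\\\\"), ("`", "\\`"), ("*", "\\*"), ("_", "\\_"),
     ("[", "\\["), ("]", "\\]"), ("<", "\\<"), (">", "\\>")]
  rep.foldl (fun t kv => PySem.Str.replace t kv.1 kv.2) text

-- ===== PORT B =====
-- rep keyed by the single character; rep.get(c, c) = repB.getD c (one-char string).
def repB : PySem.Dict Char String :=
  PySem.Dict.mk
    [('\\', "\\\\"), ('`', "\\`"), ('*', "\\*"), ('_', "\\_"),
     ('[', "\\["), (']', "\\]"), ('<', "\\<"), ('>', "\\>")]

def md_escape_inline_alt (text : String) : String :=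
  PySem.Str.join "" (text.toList.map (fun c => repB.getD c (String.ofList [c])))

-- ===== PRECONDITION & SPEC =====
def Spec_md_escape_inline (text : String) (out : String) : Prop := out = md_escape_inline_alt text
instance (text : String) (out : String) : Decidable (Spec_md_escape_inline text out) := by unfold Spec_md_escape_inline; infer_instance

-- ===== CLAIM (what is proved, stated in full; the proofs are below) =====
def Claim_equal_md_escape_inline : Prop := ∀ (text : String), Dom_md_escape_inline text → Spec_md_escape_inline text (md_escape_inline text)

-- ===== LEMMAS AND PROOFS =====

-- replace with a single-character needle is a per-character flatMap
theorem go_single (k : Char) (new : List Char) :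
    ∀ (fuel : Nat) (l acc : List Char), l.length ≤ fuel →
      PySem.Chars.replace.go [k] new fuel l acc
        = acc.reverse ++ l.flatMap (fun c => if c = k then new else [c]) := by
  intro fuel
  induction fuel with
  | zero =>
    intro l acc h
    have : l = [] := by
      cases l with
      | nil => rfl
      | cons c t => simp at h
    subst this
    simp [PySem.Chars.replace.go]
  | succ n ih =>
    intro l acc h
    cases l with
    | nil => simp [PySem.Chars.replace.go]
    | cons c t =>
      by_cases hc : k = c
      · subst hc
        have hp : List.isPrefixOf [k] (k :: t) = true := by
          simp [List.isPrefixOf]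
        simp only [PySem.Chars.replace.go, hp, if_true]
        rw [ih _ _ (by simpa using Nat.le_of_succ_le_succ h)]
        simp
      · have hp : List.isPrefixOf [k] (c :: t) = false := by
          simp [List.isPrefixOf]; exact fun h' => hc h'
        simp only [PySem.Chars.replace.go, hp, Bool.false_eq_true, if_false]
        rw [ih _ _ (Nat.le_of_succ_le_succ h)]
        simp [Ne.symm hc]

theorem replace_single (k : Char) (new s : List Char) :
    PySem.Chars.replace s [k] new = s.flatMap (fun c => if c = k then new else [c]) := by
  simp [PySem.Chars.replace, go_single k new s.length s [] (le_refl _)]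

-- the eight per-character escape steps, name shorthands
def f1 (c : Char) : List Char := if c = '\\' then "\\\\".toList else [c]
def f2 (c : Char) : List Char := if c = '`' then "\\`".toList else [c]
def f3 (c : Char) : List Char := if c = '*' then "\\*".toList else [c]
def f4 (c : Char) : List Char := if c = '_' then "\\_".toList else [c]
def f5 (c : Char) : List Char := if c = '[' then "\\[".toList else [c]
def f6 (c : Char) : List Char := if c = ']' then "\\]".toList else [c]
def f7 (c : Char) : List Char := if c = '<' then "\\<".toList else [c]
def f8 (c : Char) : List Char := if c = '>' then "\\>".toList else [c]

theorem join_empty_sep : ∀ (parts : List (List Char)),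
    PySem.Chars.join [] parts = parts.flatten := by
  intro parts
  induction parts with
  | nil => exact PySem.Chars.join_nil []
  | cons p rest ih =>
    cases rest with
    | nil => simp [PySem.Chars.join, List.intercalate]
    | cons q rest' =>
      rw [PySem.Chars.join_cons_cons]
      simp [ih]

-- the composed per-character action of A equals B's one dict lookup
theorem pointwise (c : Char) :
    ((((((((f1 c).flatMap f2).flatMap f3).flatMap f4).flatMap f5).flatMap f6).flatMap
      f7).flatMap f8)
      = (repB.getD c (String.ofList [c])).toList := by
  by_cases h1 : c = '\\'; · subst h1; decide
  by_cases h2 : c = '`';  · subst h2; decide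
  by_cases h3 : c = '*';  · subst h3; decide
  by_cases h4 : c = '_';  · subst h4; decide
  by_cases h5 : c = '[';  · subst h5; decide
  by_cases h6 : c = ']';  · subst h6; decide
  by_cases h7 : c = '<';  · subst h7; decide
  by_cases h8 : c = '>';  · subst h8; decide
  have g1 : ¬('\\' = c) := fun h => h1 h.symm
  have g2 : ¬('`' = c) := fun h => h2 h.symm
  have g3 : ¬('*' = c) := fun h => h3 h.symm
  have g4 : ¬('_' = c) := fun h => h4 h.symm
  have g5 : ¬('[' = c) := fun h => h5 h.symm
  have g6 : ¬(']' = c) := fun h => h6 h.symm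
  have g7 : ¬('<' = c) := fun h => h7 h.symm
  have g8 : ¬('>' = c) := fun h => h8 h.symm
  simp [f1, f2, f3, f4, f5, f6, f7, f8, h1, h2, h3, h4, h5, h6, h7, h8,
        g1, g2, g3, g4, g5, g6, g7, g8,
        repB, PySem.Dict.getD, PySem.Dict.get?]

-- ===== VERDICT (by name: the statement is the Claim_ definition above) =====
theorem md_escape_inline_spec : Claim_equal_md_escape_inline := by
  intro text _
  unfold Spec_md_escape_inline
  apply String.ext
  show (md_escape_inline text).toList = (md_escape_inline_alt text).toList
  have hA : (md_escape_inline text).toList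
      = text.toList.flatMap (fun c =>
          ((((((((f1 c).flatMap f2).flatMap f3).flatMap f4).flatMap f5).flatMap f6).flatMap
            f7).flatMap f8)) := by
    have e1 : ("\\" : String).toList = ['\\'] := rfl
    have e2 : ("`" : String).toList = ['`'] := rfl
    have e3 : ("*" : String).toList = ['*'] := rfl
    have e4 : ("_" : String).toList = ['_'] := rfl
    have e5 : ("[" : String).toList = ['['] := rfl
    have e6 : ("]" : String).toList = [']'] := rfl
    have e7 : ("<" : String).toList = ['<'] := rfl
    have e8 : (">" : String).toList = ['>'] := rfl
    unfold md_escape_inline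
    simp only [List.foldl_cons, List.foldl_nil]
    simp only [PySem.Str.replace, String.toList_ofList]
    simp only [e1, e2, e3, e4, e5, e6, e7, e8]
    simp only [replace_single]
    simp only [List.flatMap_assoc]
    rfl
  rw [hA]
  simp only [md_escape_inline_alt, PySem.Str.join, String.toList_ofList]
  rw [show ("" : String).toList = ([] : List Char) from rfl, join_empty_sep]
  rw [← List.flatMap_def, List.flatMap_map]
  exact List.flatMap_congr (fun c _ => pointwise c)
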